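-- pv_equiv track=rewrite | github.com/philocyber/agent-threat-modeler | agentictm/agents/repo_analyzer.py | _build_system_description
-- ===== SOURCE A (Python) =====
-- from typing import Any
--
-- def _build_system_description(
--     repo_name: str,
--     findings: list[dict[str, Any]],
--     tech_stack: set[str],
--     src_dirs: set,
-- ) -> str:
--     """Build a human-readable system description from analysis findings."""
--     parts = [f"## Repository: {repo_name}\n"]
--
--     if tech_stack:
--         parts.append(f"**Tech Stack**: {', '.join(sorted(tech_stack))}\n")
--
--     for category_name, display in [
--         ("readme", "📖 About"),
--         ("deployment", "🐳 Deployment"),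
--         ("ci_cd", "⚙️ CI/CD Pipeline"),
--         ("package_manifest", "📦 Dependencies"),
--         ("api_spec", "🔌 API Specifications"),
--         ("config", "⚙️ Configuration"),
--         ("security", "🔒 Security"),
--     ]:
--         cat_findings = [f for f in findings if f["category"] == category_name]
--         if cat_findings:
--             parts.append(f"\n### {display}")
--             for f in cat_findings:
--                 summary = f["summary"]
--                 if category_name == "readme":
--                     summary = summary[:300] + ("..." if len(summary) > 300 else "")
--                 parts.append(f"- **{f['file']}**: {summary}")
--
--     if src_dirs:
--         parts.append("\n### 📁 Source Structure")
--         for d in sorted(src_dirs):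
--             parts.append(f"- `{d}/`")
--
--     return "\n".join(parts)
-- ===== SOURCE B (Python) =====
-- _CATEGORIES = [
--     ("readme", "📖 About"),
--     ("deployment", "🐳 Deployment"),
--     ("ci_cd", "⚙️ CI/CD Pipeline"),
--     ("package_manifest", "📦 Dependencies"),
--     ("api_spec", "🔌 API Specifications"),
--     ("config", "⚙️ Configuration"),
--     ("security", "🔒 Security"),
-- ]
--
--
-- def _group_findings(findings):
--     """One pass: bucket findings by category, preserving insertion order."""
--     grouped = {}
--     for f in findings:
--         grouped.setdefault(f["category"], []).append(f)
--     return grouped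
--
--
-- def _render_finding(f, category_name):
--     summary = f["summary"]
--     if category_name == "readme":
--         summary = summary[:300] + ("..." if len(summary) > 300 else "")
--     return f"- **{f['file']}**: {summary}"
--
--
-- def _build_system_description(repo_name, findings, tech_stack, src_dirs):
--     grouped = _group_findings(findings)
--     parts = [f"## Repository: {repo_name}\n"]
--     if tech_stack:
--         parts.append(f"**Tech Stack**: {', '.join(sorted(tech_stack))}\n")
--     for category_name, display in _CATEGORIES:
--         bucket = grouped.get(category_name, [])
--         if bucket:
--             parts.append(f"\n### {display}")
--             parts.extend(_render_finding(f, category_name) for f in bucket)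
--     if src_dirs:
--         parts.append("\n### 📁 Source Structure")
--         parts.extend(f"- `{d}/`" for d in sorted(src_dirs))
--     return "\n".join(parts)
-- ===== Notes on version B (the rewrite author's own statement) =====
-- stated objective: alternative
-- what changed: B buckets findings by category in one dict-building pass and then pulls each of the seven sections with an O(1) lookup, instead of re-filtering the whole findings list once per category; section lines are emitted by a helper over the bucket instead of an inline accumulator loop.
import Mathlib
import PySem

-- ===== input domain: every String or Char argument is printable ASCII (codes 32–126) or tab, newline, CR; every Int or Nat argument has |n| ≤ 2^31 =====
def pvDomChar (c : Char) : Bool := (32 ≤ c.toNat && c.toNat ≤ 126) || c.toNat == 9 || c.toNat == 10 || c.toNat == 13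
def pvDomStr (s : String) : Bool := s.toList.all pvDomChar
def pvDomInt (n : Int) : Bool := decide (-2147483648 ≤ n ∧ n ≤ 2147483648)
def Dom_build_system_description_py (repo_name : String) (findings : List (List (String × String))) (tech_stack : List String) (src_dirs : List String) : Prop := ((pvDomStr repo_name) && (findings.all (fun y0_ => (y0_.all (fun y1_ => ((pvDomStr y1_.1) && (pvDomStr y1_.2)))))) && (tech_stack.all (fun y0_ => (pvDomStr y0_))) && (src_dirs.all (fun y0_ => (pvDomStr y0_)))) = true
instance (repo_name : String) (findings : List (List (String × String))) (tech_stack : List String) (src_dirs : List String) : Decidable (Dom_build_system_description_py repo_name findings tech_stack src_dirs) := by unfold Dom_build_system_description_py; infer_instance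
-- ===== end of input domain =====

-- B replaces A's seven whole-list filters by one grouping pass over findings plus an O(1) dict
-- lookup per category (one pass instead of seven); return values agree on all of Pre_.


-- ===== PORT A =====
-- f[k] on a dict: first-match association lookup; Python raises KeyError when the key is
-- absent — exactly those inputs are excluded by Pre_ below, so the "" default is never reached there.
def pvGet (f : List (String × String)) (k : String) : String :=
  (((f.find? (fun p => p.1 == k)).map (fun p => p.2)).getD "")

-- the literal (category, display) table from the source
def pvCats : List (String × String) :=
  [("readme", "📖 About"),
   ("deployment", "🐳 Deployment"),
   ("ci_cd", "⚙️ CI/CD Pipeline"),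
   ("package_manifest", "📦 Dependencies"),
   ("api_spec", "🔌 API Specifications"),
   ("config", "⚙️ Configuration"),
   ("security", "🔒 Security")]

def build_system_description_py (repo_name : String) (findings : List (List (String × String))) (tech_stack : List String) (src_dirs : List String) : String :=
  let parts := ["## Repository: " ++ repo_name ++ "\n"]
  let parts := if tech_stack ≠ [] then
      parts ++ ["**Tech Stack**: " ++ PySem.Str.join ", " (PySem.List.sorted tech_stack (fun x => x) false) ++ "\n"]
    else parts
  let parts := pvCats.foldl (fun parts cd =>
      let cat_findings := findings.filter (fun f => pvGet f "category" == cd.1)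
      if cat_findings ≠ [] then
        cat_findings.foldl (fun parts f =>
          let summary := pvGet f "summary"
          -- summary[:300] for the nonnegative literal bound 300 is exactly take 300 on the chars
          let summary := if cd.1 == "readme"
            then String.ofList (summary.toList.take 300) ++ (if PySem.Str.len summary > 300 then "..." else "")
            else summary
          parts ++ ["- **" ++ pvGet f "file" ++ "**: " ++ summary])
          (parts ++ ["\n### " ++ cd.2])
      else parts) parts
  let parts := if src_dirs ≠ [] then
      (PySem.List.sorted src_dirs (fun x => x) false).foldl
        (fun parts d => parts ++ ["- `" ++ d ++ "/`"]) (parts ++ ["\n### 📁 Source Structure"])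
    else parts
  PySem.Str.join "\n" parts

-- ===== PORT B =====
-- one pass: grouped.setdefault(f["category"], []).append(f)  ==  modify key [] (· ++ [f])
def pvGroupFindings (findings : List (List (String × String))) : PySem.Dict String (List (List (String × String))) :=
  findings.foldl (fun d f => d.modify (pvGet f "category") [] (fun l => l ++ [f])) PySem.Dict.empty

def pvRenderFinding (f : List (String × String)) (category_name : String) : String :=
  let summary := pvGet f "summary"
  let summary := if category_name == "readme"
    then String.ofList (summary.toList.take 300) ++ (if PySem.Str.len summary > 300 then "..." else "")
    else summary
  "- **" ++ pvGet f "file" ++ "**: " ++ summary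

def build_system_description_py_alt (repo_name : String) (findings : List (List (String × String))) (tech_stack : List String) (src_dirs : List String) : String :=
  let grouped := pvGroupFindings findings
  let parts := ["## Repository: " ++ repo_name ++ "\n"]
  let parts := if tech_stack ≠ [] then
      parts ++ ["**Tech Stack**: " ++ PySem.Str.join ", " (PySem.List.sorted tech_stack (fun x => x) false) ++ "\n"]
    else parts
  let parts := pvCats.foldl (fun parts cd =>
      let bucket := grouped.getD cd.1 []
      if bucket ≠ [] then
        (parts ++ ["\n### " ++ cd.2]) ++ bucket.map (fun f => pvRenderFinding f cd.1)
      else parts) parts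
  let parts := if src_dirs ≠ [] then
      (parts ++ ["\n### 📁 Source Structure"]) ++ (PySem.List.sorted src_dirs (fun x => x) false).map (fun d => "- `" ++ d ++ "/`")
    else parts
  PySem.Str.join "\n" parts

-- ===== PRECONDITION & SPEC =====
-- Pre_ excludes exactly the inputs where Python A raises KeyError: a finding without a
-- "category" key, or a finding in one of the seven emitted categories without "summary" or "file".
def Pre_build_system_description_py (repo_name : String) (findings : List (List (String × String))) (tech_stack : List String) (src_dirs : List String) : Prop :=
  ∀ f ∈ findings,
    (f.find? (fun p => p.1 == "category")).isSome = true ∧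
    (pvGet f "category" ∈ pvCats.map (fun cd => cd.1) →
      (f.find? (fun p => p.1 == "summary")).isSome = true ∧
      (f.find? (fun p => p.1 == "file")).isSome = true)
instance (repo_name : String) (findings : List (List (String × String))) (tech_stack : List String) (src_dirs : List String) : Decidable (Pre_build_system_description_py repo_name findings tech_stack src_dirs) := by unfold Pre_build_system_description_py; infer_instance

def pvWitness_build_system_description_py : String × (List (List (String × String))) × List String × List String :=
  ("repo", [[("category", "readme"), ("summary", "hi"), ("file", "README.md")], [("category", "misc")]], ["python"], ["src"])

def Spec_build_system_description_py (repo_name : String) (findings : List (List (String × String))) (tech_stack : List String) (src_dirs : List String) (out : String) : Prop := out = build_system_description_py_alt repo_name findings tech_stack src_dirs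
instance (repo_name : String) (findings : List (List (String × String))) (tech_stack : List String) (src_dirs : List String) (out : String) : Decidable (Spec_build_system_description_py repo_name findings tech_stack src_dirs out) := by unfold Spec_build_system_description_py; infer_instance

-- ===== CLAIM (what is proved, stated in full; the proofs are below) =====
def Claim_equal_build_system_description_py : Prop := ∀ (repo_name : String) (findings : List (List (String × String))) (tech_stack : List String) (src_dirs : List String), Dom_build_system_description_py repo_name findings tech_stack src_dirs → Pre_build_system_description_py repo_name findings tech_stack src_dirs → Spec_build_system_description_py repo_name findings tech_stack src_dirs (build_system_description_py repo_name findings tech_stack src_dirs)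

-- ===== LEMMAS AND PROOFS =====

-- the grouping dict looked up at c is exactly A's filter of findings by category c
theorem pvGroup_getD (findings : List (List (String × String))) (c : String) :
    (pvGroupFindings findings).getD c []
      = findings.filter (fun f => pvGet f "category" == c) := by
  unfold pvGroupFindings
  have h : findings.foldl (fun d f => d.modify (pvGet f "category") [] (fun l => l ++ [f])) PySem.Dict.empty
      = (findings.map (fun f => (pvGet f "category", f))).foldl
          (fun d p => d.modify p.1 [] (fun l => l ++ [p.2])) PySem.Dict.empty := by
    rw [List.foldl_map]
  rw [h, PySem.Dict.getD_foldl_modify_append, List.filter_map]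
  simp [Function.comp_def]

theorem build_system_description_py_spec : Claim_equal_build_system_description_py := by
  intro repo_name findings tech_stack src_dirs _hdom _hpre
  unfold Spec_build_system_description_py
  unfold build_system_description_py build_system_description_py_alt
  simp only [pvGroup_getD, pvRenderFinding, PySem.List.foldl_append_singleton_eq_map,
    List.append_assoc, List.singleton_append]

-- ===== VERDICT (by name: the statement is the Claim_ definition above) =====
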